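-- pv_equiv track=rewrite | github.com/apokalix/tipe2025 | tablecarctgit.py | young_shape_to_cycles
-- ===== SOURCE A (Python) =====
-- def young_shape_to_cycles(partition):
--
--    # Donne les cycles associés à chaque ligne du diagramme de Young
--     # pour une partition donnée, en remplissant ligne par ligne avec 1 à n.
--
--     counter = 1
--     cycles = []
--     for row_len in partition:
--         if row_len > 0:
--             cycle = list(range(counter, counter + row_len))
--             if len(cycle) > 1:
--                 cycles.append(cycle)
--             counter += row_len
--     return cycles
-- ===== SOURCE B (Python) =====
-- def young_shape_to_cycles(partition):
--     # Shift-based recursion: solve the tail as if numbering restarted at 1,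
--     # then shift those cycles up by this row's length. No running counter.
--     if not partition:
--         return []
--     l = partition[0]
--     rest = young_shape_to_cycles(partition[1:])
--     if l <= 0:
--         return rest
--     shifted = [[x + l for x in c] for c in rest]
--     return ([list(range(1, 1 + l))] if l > 1 else []) + shifted
-- ===== Notes on version B (the rewrite author's own statement) =====
-- stated objective: alternative
-- what changed: Replaces A's single forward loop with a running counter by a counter-free recursion: the tail is solved as if numbering restarted at 1 and the resulting cycles are shifted up by the head row's length.
import Mathlib
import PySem

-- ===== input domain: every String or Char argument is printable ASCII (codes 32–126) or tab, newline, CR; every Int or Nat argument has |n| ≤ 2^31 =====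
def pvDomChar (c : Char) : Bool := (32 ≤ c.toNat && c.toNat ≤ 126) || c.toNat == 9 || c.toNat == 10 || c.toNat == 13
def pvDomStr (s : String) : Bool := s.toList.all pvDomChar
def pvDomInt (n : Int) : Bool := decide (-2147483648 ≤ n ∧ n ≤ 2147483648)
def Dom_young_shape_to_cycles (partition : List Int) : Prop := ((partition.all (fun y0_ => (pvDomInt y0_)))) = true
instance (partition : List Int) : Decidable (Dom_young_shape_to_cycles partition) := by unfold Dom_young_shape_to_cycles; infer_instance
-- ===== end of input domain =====

-- B is a counter-free recursion: solve the tail numbered from 1, then shift its cycles by the head row length; alternative decomposition (B is quadratic in the worst case, A linear).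


-- ===== PORT A =====
def young_shape_to_cycles (partition : List Int) : List (List Int) :=
  (partition.foldl
    (fun (st : Int × List (List Int)) row_len =>
      if row_len > 0 then
        let cycle := PySem.List.pyRange st.1 (st.1 + row_len) 1
        let cycles := if cycle.length > 1 then st.2 ++ [cycle] else st.2
        (st.1 + row_len, cycles)
      else st)
    (1, [])).2

-- ===== PORT B =====
def young_shape_to_cycles_alt : List Int → List (List Int)
  | [] => []
  | l :: p =>
      let rest := young_shape_to_cycles_alt p
      if l ≤ 0 then rest
      else
        let shifted := rest.map (fun c => c.map (fun x => x + l))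
        (if l > 1 then [PySem.List.pyRange 1 (1 + l) 1] else []) ++ shifted

-- ===== PRECONDITION & SPEC =====
def Spec_young_shape_to_cycles (partition : List Int) (out : List (List Int)) : Prop := out = young_shape_to_cycles_alt partition
instance (partition : List Int) (out : List (List Int)) : Decidable (Spec_young_shape_to_cycles partition out) := by unfold Spec_young_shape_to_cycles; infer_instance

-- ===== CLAIM (what is proved, stated in full; the proofs are below) =====
def Claim_equal_young_shape_to_cycles : Prop := ∀ (partition : List Int), Dom_young_shape_to_cycles partition → Spec_young_shape_to_cycles partition (young_shape_to_cycles partition)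

-- ===== LEMMAS AND PROOFS =====

-- Characterisation of A's emission when the running counter is c.
def pvEmit (c : Int) : List Int → List (List Int)
  | [] => []
  | l :: p =>
      (if l > 1 then [PySem.List.pyRange c (c + l) 1] else []) ++
        pvEmit (c + (if 0 < l then l else 0)) p

lemma pvA_fold (p : List Int) : ∀ (c : Int) (acc : List (List Int)),
    (p.foldl
      (fun (st : Int × List (List Int)) row_len =>
        if row_len > 0 then
          let cycle := PySem.List.pyRange st.1 (st.1 + row_len) 1
          let cycles := if cycle.length > 1 then st.2 ++ [cycle] else st.2
          (st.1 + row_len, cycles)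
        else st)
      (c, acc)).2 = acc ++ pvEmit c p := by
  induction p with
  | nil => intro c acc; simp [pvEmit]
  | cons l p ih =>
    intro c acc
    simp only [List.foldl_cons, pvEmit]
    by_cases hl : l > 0
    · have hlen : (PySem.List.pyRange c (c + l) 1).length = l.toNat := by
        rw [PySem.List.length_pyRange_one]; omega
      by_cases h1 : l > 1
      · simp only [if_pos hl, if_pos h1, hlen]
        rw [if_pos (by omega), ih]
        simp
      · simp only [if_pos hl, if_neg h1, hlen]
        rw [if_neg (by omega), ih]
        simp
    · have h1 : ¬ l > 1 := by omega
      simp only [if_neg hl, if_neg h1]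
      rw [ih]
      simp

lemma pvRange_shift (a b d : Int) :
    (PySem.List.pyRange a b 1).map (fun x => x + d) = PySem.List.pyRange (a + d) (b + d) 1 := by
  rw [PySem.List.pyRange_one, PySem.List.pyRange_one]
  have : (b + d - (a + d)).toNat = (b - a).toNat := by omega
  rw [this, List.map_map]
  exact List.map_congr_left (fun k _ => by simp; ring)

-- B's recursion, shifted by c - 1, is A's emission with counter c.
lemma pvB_shift (p : List Int) : ∀ (c : Int),
    pvEmit c p = (young_shape_to_cycles_alt p).map (fun cy => cy.map (fun x => x + (c - 1))) := by
  induction p with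
  | nil => intro c; simp [pvEmit, young_shape_to_cycles_alt]
  | cons l p ih =>
    intro c
    simp only [pvEmit, young_shape_to_cycles_alt]
    by_cases hl : 0 < l
    · have hl' : ¬ l ≤ 0 := by omega
      simp only [if_pos hl, if_neg hl', List.map_append, List.map_map]
      congr 1
      · by_cases h1 : l > 1
        · simp only [if_pos h1, List.map_cons, List.map_nil, pvRange_shift]
          congr 2 <;> ring
        · simp [if_neg h1]
      · rw [ih (c + l)]
        apply List.map_congr_left
        intro cy _
        simp only [Function.comp, List.map_map]
        apply List.map_congr_left
        intro x _
        simp only [Function.comp]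
        ring
    · have h1 : ¬ l > 1 := by omega
      have hl' : l ≤ 0 := by omega
      simp only [if_neg h1, if_pos hl', if_neg hl, add_zero, List.nil_append]
      exact ih c

-- ===== VERDICT (by name: the statement is the Claim_ definition above) =====
theorem young_shape_to_cycles_spec : Claim_equal_young_shape_to_cycles := by
  intro p _
  unfold Spec_young_shape_to_cycles young_shape_to_cycles
  rw [pvA_fold p 1 []]
  rw [pvB_shift p 1]
  simp
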